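-- pv_equiv track=rewrite | github.com/ksm26/TensorTonic-Solutions | lag-features/lag-features.py | lag_features
-- ===== SOURCE A (Python) =====
-- def lag_features(series, lags):
--     """
--     Create a lag feature matrix from the time series.
--     """
--     # Write code here
--     maxlag = max(lags)
--     result = []
--
--     for t in range(maxlag,len(series)):
--         row = []
--         for lag in lags:
--             row.append(series[t-lag])
--         result.append(row)
--
--     return result
-- ===== SOURCE B (Python) =====
-- def lag_features(series, lags):
--     """
--     Create a lag feature matrix from the time series.
--     """
--     maxlag = max(lags)
--     n = len(series)
--     rows = max(0, n - maxlag)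
--     cols = [series[maxlag - lag : maxlag - lag + rows] for lag in lags]
--     return [list(row) for row in zip(*cols)]
-- ===== Notes on version B (the rewrite author's own statement) =====
-- stated objective: alternative
-- what changed: B replaces A's nested element-wise loops by per-lag column slices followed by a zip(*cols) transpose.
import Mathlib
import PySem

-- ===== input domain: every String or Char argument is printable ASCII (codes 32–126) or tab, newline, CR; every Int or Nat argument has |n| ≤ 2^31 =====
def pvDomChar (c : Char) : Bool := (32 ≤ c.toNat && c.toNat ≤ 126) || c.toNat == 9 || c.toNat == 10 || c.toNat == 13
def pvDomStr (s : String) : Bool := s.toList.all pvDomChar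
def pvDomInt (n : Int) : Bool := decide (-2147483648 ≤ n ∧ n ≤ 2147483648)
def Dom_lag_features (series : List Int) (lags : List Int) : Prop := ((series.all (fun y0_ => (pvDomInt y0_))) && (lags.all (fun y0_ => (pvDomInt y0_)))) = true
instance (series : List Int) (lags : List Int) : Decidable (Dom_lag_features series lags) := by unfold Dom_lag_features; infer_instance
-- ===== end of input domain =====

-- B builds the lag matrix as per-lag column slices transposed by zip(*cols) instead of A's nested element loops (alternative decomposition, same cost).


-- ===== PORT A =====
-- maxlag = max(lags) raises ValueError on empty lags (max? = none, outside Pre_);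
-- series[t-lag] raises IndexError where pyGet? = none (outside Pre_).
def lag_features (series : List Int) (lags : List Int) : List (List Int) :=
  match PySem.List.max? lags (fun x => x) with
  | none => []
  | some maxlag =>
    (PySem.List.pyRange maxlag (series.length : Int) 1).foldl
      (fun result t =>
        result ++ [lags.foldl (fun row lag => row ++ (PySem.List.pyGet? series (t - lag)).toList) []])
      []

-- ===== PORT B =====
-- zip(*cols) ported by hand (exact: stops at the shortest column, like Python's zip).
def pyZipGo : List Int → List (List Int) → List (List Int)
  | [], _ => []
  | x :: xs, rest =>
    if rest.all (fun l => !l.isEmpty) then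
      (x :: rest.map (fun l => l.headI)) :: pyZipGo xs (rest.map List.tail)
    else []

def pyZipStar : List (List Int) → List (List Int)
  | [] => []
  | c :: cs => pyZipGo c cs

def lag_features_alt (series : List Int) (lags : List Int) : List (List Int) :=
  match PySem.List.max? lags (fun x => x) with
  | none => []
  | some maxlag =>
    let n : Int := (series.length : Int)
    let rows : Int := max 0 (n - maxlag)
    let cols := lags.map (fun lag =>
      PySem.List.slice series (some (maxlag - lag)) (some (maxlag - lag + rows)))
    pyZipStar cols

-- ===== PRECONDITION & SPEC =====
-- Pre_ excludes exactly the inputs where A raises: empty lags (ValueError) and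
-- lists containing a negative lag with max(lags) < len(series) (IndexError).
def Pre_lag_features (series : List Int) (lags : List Int) : Prop :=
  lags ≠ [] ∧ ((∀ l ∈ lags, 0 ≤ l) ∨ (∃ l ∈ lags, (series.length : Int) ≤ l))
instance (series : List Int) (lags : List Int) : Decidable (Pre_lag_features series lags) := by
  unfold Pre_lag_features; infer_instance
def pvWitness_lag_features : List Int × List Int := ([3, 1, 4, 1, 5, 9], [1, 2])

def Spec_lag_features (series : List Int) (lags : List Int) (out : List (List Int)) : Prop := out = lag_features_alt series lags
instance (series : List Int) (lags : List Int) (out : List (List Int)) : Decidable (Spec_lag_features series lags out) := by unfold Spec_lag_features; infer_instance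

-- ===== CLAIM (what is proved, stated in full; the proofs are below) =====
def Claim_equal_lag_features : Prop := ∀ (series : List Int) (lags : List Int), Dom_lag_features series lags → Pre_lag_features series lags → Spec_lag_features series lags (lag_features series lags)
-- ===== LEMMAS AND PROOFS =====

theorem getD_tail (d : List Int) (i : Nat) : d.tail.getD i 0 = d.getD (i+1) 0 := by
  cases d <;> simp [List.getD]

theorem pyZipGo_eq (r : Nat) : ∀ (c : List Int) (cs : List (List Int)),
    c.length = r → (∀ d ∈ cs, d.length = r) →
    pyZipGo c cs = (List.range r).map (fun i => (c :: cs).map (fun l => l.getD i 0)) := by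
  induction r with
  | zero =>
    intro c cs hc _
    cases c with
    | nil => simp [pyZipGo]
    | cons x xs => simp at hc
  | succ r ih =>
    intro c cs hc hcs
    cases c with
    | nil => simp at hc
    | cons x xs =>
      have hall : cs.all (fun l => !l.isEmpty) = true := by
        simp only [List.all_eq_true, Bool.not_eq_eq_eq_not]
        intro d hd
        have := hcs d hd
        cases d
        · simp at this
        · simp
      have htails : ∀ d ∈ cs.map List.tail, d.length = r := by
        intro d hd
        simp only [List.mem_map] at hd
        obtain ⟨e, he, rfl⟩ := hd
        have := hcs e he
        cases e
        · simp at this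
        · simpa using this
      rw [pyZipGo, if_pos hall, ih xs (cs.map List.tail) (by simpa using hc) htails]
      rw [List.range_succ_eq_map, List.map_cons, List.map_map]
      congr 1
      · simp only [List.map_cons, List.getD, List.getElem?_cons_zero, Option.getD_some]
        congr 1
        apply List.map_congr_left
        intro d hd
        have := hcs d hd
        cases d
        · simp at this
        · simp [List.getD]
      · apply List.map_congr_left
        intro i _
        simp [Function.comp, getD_tail, List.getD]

theorem lag_equal : ∀ (series lags : List Int),
    lags ≠ [] → ((∀ l ∈ lags, 0 ≤ l) ∨ (∃ l ∈ lags, (series.length : Int) ≤ l)) →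
    lag_features series lags = lag_features_alt series lags := by
  intro series lags hne hdisj
  obtain ⟨m, hm⟩ : ∃ m, PySem.List.max? lags (fun x => x) = some m := by
    cases h : PySem.List.max? lags (fun x => x) with
    | none => exact absurd ((PySem.List.max?_eq_none_iff lags _).mp h) hne
    | some m => exact ⟨m, rfl⟩
  have hmax : ∀ y ∈ lags, y ≤ m := PySem.List.max?_isMax hm
  unfold lag_features lag_features_alt
  rw [hm]
  simp only []
  set n : Int := (series.length : Int) with hn
  have hn0 : 0 ≤ n := by positivity
  by_cases hcase : n ≤ m
  · -- degenerate: empty range on A's side, empty columns on B's side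
    rw [PySem.List.pyRange_one_eq_nil hcase]
    have hrows : max 0 (n - m) = 0 := by omega
    rw [hrows]
    have hcols : lags.map (fun lag =>
        PySem.List.slice series (some (m - lag)) (some (m - lag + 0)))
        = lags.map (fun _ => ([] : List Int)) := by
      apply List.map_congr_left
      intro lag hlag
      have h0 : 0 ≤ m - lag := by have := hmax lag hlag; omega
      rw [add_zero, PySem.List.slice_toNat series h0 h0]
      simp
    rw [hcols]
    cases lags with
    | nil => exact absurd rfl hne
    | cons a as => simp [pyZipStar, pyZipGo, List.foldl_nil]
  · -- main case: maxlag < n, and all lags are nonnegative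
    push_neg at hcase
    have hpos : ∀ l ∈ lags, 0 ≤ l := by
      rcases hdisj with h | ⟨l, hl, hlen⟩
      · exact h
      · exact absurd (lt_of_le_of_lt (le_trans hlen (hmax l hl)) hcase) (lt_irrefl n)
    set r : Nat := (n - m).toNat with hr
    -- A side
    rw [PySem.List.pyRange_one, List.foldl_map,
        PySem.List.foldl_append_singleton_eq_map
          (fun k : Nat => lags.foldl (fun row lag => row ++ (PySem.List.pyGet? series (m + (k:Int) - lag)).toList) []) _ []]
    have hm0 : 0 ≤ m := hpos m (PySem.List.max?_mem hm)
    have hrows : max 0 (n - m) = n - m := by omega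
    rw [hrows]
    have hcols : lags.map (fun lag =>
        PySem.List.slice series (some (m - lag)) (some (m - lag + (n - m))))
        = lags.map (fun lag => List.take r (List.drop (m - lag).toNat series)) := by
      apply List.map_congr_left
      intro lag hlag
      have hl0 : 0 ≤ lag := hpos lag hlag
      have hlm : lag ≤ m := hmax lag hlag
      rw [PySem.List.slice_toNat series (by omega) (by omega)]
      congr 1
      omega
    rw [hcols]
    have hlen : ∀ d ∈ lags.map (fun lag => List.take r (List.drop (m - lag).toNat series)),
        d.length = r := by
      intro d hd
      simp only [List.mem_map] at hd
      obtain ⟨lag, hlag, rfl⟩ := hd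
      have hl0 : 0 ≤ lag := hpos lag hlag
      have hlm : lag ≤ m := hmax lag hlag
      simp only [List.length_take, List.length_drop]
      omega
    have hstep : ∀ (k : Nat), k < r →
        (lags.foldl (fun row lag => row ++ (PySem.List.pyGet? series (m + (k:Int) - lag)).toList) [])
        = lags.map (fun lag => (List.take r (List.drop (m - lag).toNat series)).getD k 0) := by
      intro k hk
      rw [PySem.List.foldl_congr_mem lags _
        (fun row lag => row ++ [(List.take r (List.drop (m - lag).toNat series)).getD k 0]) []
        ?_]
      · exact PySem.List.foldl_append_singleton_eq_map _ lags []
      · intro acc lag hlag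
        have hl0 : 0 ≤ lag := hpos lag hlag
        have hlm : lag ≤ m := hmax lag hlag
        have hidx : (m + (k:Int) - lag).toNat < series.length := by omega
        rw [PySem.List.pyGet?_of_nonneg series (by omega),
            List.getElem?_eq_getElem hidx]
        congr 1
        rw [List.getD_eq_getElem?_getD, List.getElem?_take, if_pos hk, List.getElem?_drop]
        have : (m - lag).toNat + k = (m + (k:Int) - lag).toNat := by omega
        rw [this, List.getElem?_eq_getElem hidx]
        simp
    cases lags with
    | nil => exact absurd rfl hne
    | cons a as =>
      rw [List.map_cons, pyZipStar,
          pyZipGo_eq r _ _ (hlen _ (by simp)) (by intro d hd; exact hlen d (by simp [hd]))]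
      simp only [List.nil_append, ← List.map_cons]
      apply List.map_congr_left
      intro k hk
      rw [List.mem_range] at hk
      rw [hstep k (by omega), List.map_cons]
      simp only [List.map_cons, List.map_map, Function.comp]
      simp only [Function.comp_def]

-- ===== VERDICT (by name: the statement is the Claim_ definition above) =====
theorem lag_features_spec : Claim_equal_lag_features := by
  intro series lags _ hpre
  unfold Spec_lag_features
  exact lag_equal series lags hpre.1 hpre.2
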